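-- pv_equiv track=rewrite | github.com/franmabb/Python | Relacion ejercicio 6/Ejercicio 8.py | traducir_frase
-- ===== SOURCE A (Python) =====
-- def traducir_frase(frase, dic):
--     puntuacion = '.,;:!?()[]{}"\''
--     palabras = frase.split()
--     resultado = []
--     for tok in palabras:
--         original = tok
--
--         pref = ''
--         while tok and tok[0] in puntuacion:
--             pref += tok[0]
--             tok = tok[1:]
--         suf = ''
--         while tok and tok[-1] in puntuacion:
--             suf = tok[-1] + suf
--             tok = tok[:-1]
--         if not tok:
--             resultado.append(original)
--             continue
--         clave = tok.lower()
--         trad = dic.get(clave, tok)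
--         if tok[0].isupper():
--             trad = trad.capitalize()
--         resultado.append(f"{pref}{trad}{suf}")
--     return ' '.join(resultado)
-- ===== SOURCE B (Python) =====
-- def traducir_frase(frase, dic):
--     puntuacion = '.,;:!?()[]{}"\''
--
--     def render(tok):
--         nucleo = tok.strip(puntuacion)
--         if not nucleo:
--             return tok
--         i = len(tok) - len(tok.lstrip(puntuacion))
--         trad = dic.get(nucleo.lower(), nucleo)
--         if nucleo[0].isupper():
--             trad = trad.capitalize()
--         return tok[:i] + trad + tok[i + len(nucleo):]
--
--     return ' '.join(render(t) for t in frase.split())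
-- ===== Notes on version B (the rewrite author's own statement) =====
-- stated objective: idiomatic
-- what changed: The two hand-written char-peeling while-loops that mutably build pref/suf are replaced by library strip/lstrip plus slice reconstruction of the token, and the explicit accumulator loop by a join over a generator with a per-token helper.
import Mathlib
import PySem

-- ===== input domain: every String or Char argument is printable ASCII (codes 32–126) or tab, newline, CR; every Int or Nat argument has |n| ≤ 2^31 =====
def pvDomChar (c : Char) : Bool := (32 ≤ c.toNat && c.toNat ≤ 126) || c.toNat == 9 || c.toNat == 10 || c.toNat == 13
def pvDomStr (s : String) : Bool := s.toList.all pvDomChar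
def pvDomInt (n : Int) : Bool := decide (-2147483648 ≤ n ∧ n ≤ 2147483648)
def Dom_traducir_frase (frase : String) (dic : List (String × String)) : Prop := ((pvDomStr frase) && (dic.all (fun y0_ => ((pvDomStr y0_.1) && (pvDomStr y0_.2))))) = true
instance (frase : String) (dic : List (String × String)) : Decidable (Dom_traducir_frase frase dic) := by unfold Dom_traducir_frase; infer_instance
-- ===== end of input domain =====

-- B replaces A's two char-peeling while-loops by strip/lstrip + slice reconstruction (idiomatic, same cost).

-- punctuation set (both Pythons define the same local constant)
def punctChars : List Char := ".,;:!?()[]{}\"'".toList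

-- str.capitalize() ported by hand (PySem has no capitalize): uppercase first char, lowercase the rest — exact on ASCII
def pyCapitalize (s : List Char) : List Char :=
  match s with
  | [] => []
  | c :: rest => PySem.Chars.upperChar c :: PySem.Chars.lower rest

-- ===== PORT A =====
-- while tok and tok[0] in puntuacion: pref += tok[0]; tok = tok[1:]
def prefLoopA (pref tok : List Char) : List Char × List Char :=
  match tok with
  | [] => (pref, [])
  | c :: rest => if punctChars.contains c then prefLoopA (pref ++ [c]) rest else (pref, c :: rest)

-- while tok and tok[-1] in puntuacion: suf = tok[-1] + suf; tok = tok[:-1]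
def sufLoopA (suf tok : List Char) : List Char × List Char :=
  if h : tok = [] then (suf, tok)
  else if punctChars.contains (tok.getLast h) then sufLoopA (tok.getLast h :: suf) tok.dropLast
  else (suf, tok)
termination_by tok.length
decreasing_by
  have : 0 < tok.length := List.length_pos_iff.mpr h
  simp [List.length_dropLast]; omega

def renderA (dic : List (String × String)) (tok : List Char) : List Char :=
  let original := tok
  let p1 := prefLoopA [] tok
  let pref := p1.1
  let tok1 := p1.2
  let p2 := sufLoopA [] tok1
  let suf := p2.1
  let tok2 := p2.2
  if tok2 = [] then original
  else
    let clave := PySem.Chars.lower tok2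
    let trad := ((PySem.Dict.mk dic).getD (String.mk clave) (String.mk tok2)).toList
    let trad := if PySem.Chars.isupper tok2.headI then pyCapitalize trad else trad
    pref ++ trad ++ suf

def traducir_frase (frase : String) (dic : List (String × String)) : String :=
  String.mk (PySem.Chars.join [' '] ((PySem.Chars.split₀ frase.toList).map (renderA dic)))

-- ===== PORT B =====
def renderB (dic : List (String × String)) (tok : List Char) : List Char :=
  let nucleo := PySem.Chars.stripChars tok punctChars
  if nucleo = [] then tok
  else
    -- i = len(tok) - len(tok.lstrip(puntuacion)); lstrip(chars) ported by hand as dropWhile (exact)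
    let i := tok.length - (tok.dropWhile (fun c => punctChars.contains c)).length
    let trad := ((PySem.Dict.mk dic).getD (String.mk (PySem.Chars.lower nucleo)) (String.mk nucleo)).toList
    let trad := if PySem.Chars.isupper nucleo.headI then pyCapitalize trad else trad
    tok.take i ++ trad ++ tok.drop (i + nucleo.length)

def traducir_frase_alt (frase : String) (dic : List (String × String)) : String :=
  String.mk (PySem.Chars.join [' '] ((PySem.Chars.split₀ frase.toList).map (renderB dic)))

-- ===== PRECONDITION & SPEC =====
def Spec_traducir_frase (frase : String) (dic : List (String × String)) (out : String) : Prop := out = traducir_frase_alt frase dic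
instance (frase : String) (dic : List (String × String)) (out : String) : Decidable (Spec_traducir_frase frase dic out) := by unfold Spec_traducir_frase; infer_instance

-- ===== CLAIM (what is proved, stated in full; the proofs are below) =====
def Claim_equal_traducir_frase : Prop := ∀ (frase : String) (dic : List (String × String)), Dom_traducir_frase frase dic → Spec_traducir_frase frase dic (traducir_frase frase dic)

-- ===== LEMMAS AND PROOFS =====

theorem prefLoopA_eq (tok : List Char) : ∀ pref, prefLoopA pref tok =
    (pref ++ tok.takeWhile (fun c => punctChars.contains c), tok.dropWhile (fun c => punctChars.contains c)) := by
  induction tok with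
  | nil => intro pref; simp [prefLoopA]
  | cons c rest ih =>
    intro pref
    by_cases hc : c ∈ punctChars
    · simp [prefLoopA, hc, ih]
    · simp [prefLoopA, hc]

theorem sufLoopA_eq (tok : List Char) : ∀ suf, sufLoopA suf tok =
    ((tok.reverse.takeWhile (fun c => punctChars.contains c)).reverse ++ suf,
     (tok.reverse.dropWhile (fun c => punctChars.contains c)).reverse) := by
  induction tok using List.reverseRecOn with
  | nil => intro suf; simp [sufLoopA]
  | append_singleton ys c ih =>
    intro suf
    have hne : ys ++ [c] ≠ [] := by simp
    rw [sufLoopA, dif_neg hne]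
    by_cases hc : c ∈ punctChars
    · simp [List.getLast_concat, hc, List.dropLast_concat, ih]
    · simp [List.getLast_concat, hc, List.dropLast_concat]

theorem strip_decomp (p : Char → Bool) (l : List Char) :
    l = l.takeWhile p ++ ((l.dropWhile p).reverse.dropWhile p).reverse
          ++ ((l.dropWhile p).reverse.takeWhile p).reverse := by
  have h1 : (l.dropWhile p) =
      ((l.dropWhile p).reverse.dropWhile p).reverse ++ ((l.dropWhile p).reverse.takeWhile p).reverse := by
    calc l.dropWhile p = (l.dropWhile p).reverse.reverse := (List.reverse_reverse _).symm
      _ = ((l.dropWhile p).reverse.takeWhile p ++ (l.dropWhile p).reverse.dropWhile p).reverse := by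
            rw [List.takeWhile_append_dropWhile]
      _ = _ := by rw [List.reverse_append]
  conv_lhs => rw [← List.takeWhile_append_dropWhile (p := p) (l := l), h1]
  rw [List.append_assoc]

theorem len_sub (p : Char → Bool) (l : List Char) :
    l.length - (l.dropWhile p).length = (l.takeWhile p).length := by
  have := congrArg List.length (List.takeWhile_append_dropWhile (p := p) (l := l))
  simp only [List.length_append] at this
  omega

theorem take_part (p : Char → Bool) (l : List Char) :
    l.take (l.takeWhile p).length = l.takeWhile p :=
  (List.prefix_iff_eq_take.mp (List.takeWhile_prefix p)).symm

theorem drop_part (p : Char → Bool) (l : List Char) : ∀ n,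
    n = (l.takeWhile p).length + ((l.dropWhile p).reverse.dropWhile p).reverse.length →
    l.drop n = ((l.dropWhile p).reverse.takeWhile p).reverse := by
  intro n hn
  conv_lhs => rw [strip_decomp p l]
  subst hn
  rw [← List.length_append]
  exact List.drop_left

theorem render_eq (dic : List (String × String)) (tok : List Char) :
    renderA dic tok = renderB dic tok := by
  simp only [renderA, renderB, prefLoopA_eq, sufLoopA_eq, PySem.Chars.stripChars,
    List.nil_append, List.append_nil]
  split_ifs with hc hu
  · rfl
  · rw [len_sub, take_part, drop_part (fun c => punctChars.contains c) tok _ rfl]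
  · rw [len_sub, take_part, drop_part (fun c => punctChars.contains c) tok _ rfl]

-- ===== VERDICT (by name: the statement is the Claim_ definition above) =====
theorem traducir_frase_spec : Claim_equal_traducir_frase := by
  intro frase dic _
  unfold Spec_traducir_frase traducir_frase traducir_frase_alt
  rw [show renderA dic = renderB dic from funext (render_eq dic)]
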